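-- pv_equiv track=rewrite | github.com/jonnivoss/loputoo | paarid/test.py | count_pairs_from_multiple_words
-- ===== SOURCE A (Python) =====
-- def separate_into_pairs(word):
--     pairs = {}
--     for i in range(len(word) - 1):
--         parr = word[i:i + 2]
--         separate = list(parr)
--         sorr = sorted(separate)
--         pair = ''.join(sorr)
--         if pair in pairs:
--             pairs[pair] += 1
--         else:
--             pairs[pair] = 1
--     return pairs
--
-- def count_pairs_from_multiple_words(words_with_count):
--     all_pairs = {}
--     for word, counts in words_with_count.items():
--         pairs = separate_into_pairs(word)
--         for pair, pair_count in pairs.items():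
--             if pair in all_pairs:
--                 all_pairs[pair] += pair_count * counts['kokku']
--             else:
--                 all_pairs[pair] = pair_count * counts['kokku']
--     return all_pairs
-- ===== SOURCE B (Python) =====
-- def count_pairs_from_multiple_words(words_with_count):
--     occurrences = [
--         (''.join(sorted(word[i:i + 2])), counts['kokku'])
--         for word, counts in words_with_count.items()
--         for i in range(len(word) - 1)
--     ]
--     keys = list(dict.fromkeys(key for key, _ in occurrences))
--     return {key: sum(w for k, w in occurrences if k == key) for key in keys}
-- ===== Notes on version B (the rewrite author's own statement) =====
-- stated objective: alternative
-- what changed: B is a two-phase group-by: it first flattens the input into one list of weighted pair occurrences, then dedups the keys in first-occurrence order and builds the result by summing, for each distinct key, the weights of its occurrences - no accumulator dict is threaded through the traversal and no per-word intermediate dict exists.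
import Mathlib
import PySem

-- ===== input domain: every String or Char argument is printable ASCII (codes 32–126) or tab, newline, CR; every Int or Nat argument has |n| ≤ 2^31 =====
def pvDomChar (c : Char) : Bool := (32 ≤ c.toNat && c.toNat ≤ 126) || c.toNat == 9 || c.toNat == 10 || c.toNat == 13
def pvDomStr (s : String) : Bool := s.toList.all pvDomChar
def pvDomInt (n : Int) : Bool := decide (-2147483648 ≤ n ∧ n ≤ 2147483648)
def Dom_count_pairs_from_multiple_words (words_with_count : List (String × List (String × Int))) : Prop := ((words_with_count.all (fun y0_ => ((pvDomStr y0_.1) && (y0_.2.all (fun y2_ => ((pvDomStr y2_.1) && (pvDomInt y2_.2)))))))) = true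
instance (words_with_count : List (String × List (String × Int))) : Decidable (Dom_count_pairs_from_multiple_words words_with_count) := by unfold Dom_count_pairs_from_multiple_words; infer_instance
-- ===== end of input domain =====

-- ===== PORT A =====
-- B is a two-phase group-by: it first flattens the input into one flat list of weighted
-- pair occurrences, then dedups the keys in first-occurrence order and builds the result
-- by summing, per distinct key, the weights of its occurrences — no accumulator dict is
-- threaded through the traversal and no per-word intermediate dict exists; objective:
-- alternative. Return values proved equal; neither version mutates its argument.
-- list(str) is ported as the code-point list and ''.join of single characters as the
-- string of those code points (exact); the 'kokku' lookup is the total getD form,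
-- exact under Pre_ (KeyError inputs are excluded there).
def separate_into_pairs (word : String) : PySem.Dict String Int :=
  (PySem.List.pyRange 0 (PySem.Str.len word - 1) 1).foldl (fun pairs i =>
    let parr := PySem.List.slice word.toList (some i) (some (i + 2))  -- word[i:i+2]
    let separate := parr                                              -- list(parr)
    let sorr := PySem.List.sorted separate (fun c => c) false         -- sorted(separate)
    let pair := String.ofList sorr                                        -- ''.join(sorr)
    if pairs.contains pair then pairs.modify pair 0 (· + 1) else pairs.insert pair 1)
    PySem.Dict.empty

def count_pairs_from_multiple_words (words_with_count : List (String × List (String × Int))) : List (String × Int) :=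
  (words_with_count.foldl (fun all_pairs wc =>
    (separate_into_pairs wc.1).items.foldl (fun ap pc =>
      if ap.contains pc.1 then
        ap.modify pc.1 0 (· + pc.2 * PySem.Dict.getD ⟨wc.2⟩ "kokku" 0)
      else
        ap.insert pc.1 (pc.2 * PySem.Dict.getD ⟨wc.2⟩ "kokku" 0)) all_pairs)
    PySem.Dict.empty).items

-- ===== PORT B =====
def count_pairs_from_multiple_words_alt (words_with_count : List (String × List (String × Int))) : List (String × Int) :=
  -- occurrences = [(''.join(sorted(word[i:i+2])), counts['kokku']) for word, counts in … for i in range(len(word)-1)]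
  let occurrences := words_with_count.flatMap (fun wc =>
    (PySem.List.pyRange 0 (PySem.Str.len wc.1 - 1) 1).map (fun i =>
      (String.ofList (PySem.List.sorted (PySem.List.slice wc.1.toList (some i) (some (i + 2))) (fun c => c) false),
       PySem.Dict.getD ⟨wc.2⟩ "kokku" 0)))
  -- keys = list(dict.fromkeys(key for key, _ in occurrences))
  let keys := PySem.List.dedup (occurrences.map (fun p => p.1))
  -- {key: sum(w for k, w in occurrences if k == key) for key in keys}
  (keys.foldl (fun d key =>
      d.insert key (((occurrences.filter (fun p => p.1 == key)).map (fun p => p.2)).sum))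
    PySem.Dict.empty).items

-- ===== PRECONDITION & SPEC =====
-- Pre_ excludes exactly the inputs on which the Python A raises KeyError: a word of
-- length >= 2 whose counts dict has no 'kokku' key (B raises there too).
def Pre_count_pairs_from_multiple_words (words_with_count : List (String × List (String × Int))) : Prop :=
  ∀ p ∈ words_with_count, 1 < p.1.toList.length →
    PySem.Dict.contains (PySem.Dict.mk p.2) "kokku" = true
instance (words_with_count : List (String × List (String × Int))) : Decidable (Pre_count_pairs_from_multiple_words words_with_count) := by
  unfold Pre_count_pairs_from_multiple_words; infer_instance
def pvWitness_count_pairs_from_multiple_words : (List (String × List (String × Int))) :=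
  [("ab", [("kokku", 2)])]
def Spec_count_pairs_from_multiple_words (words_with_count : List (String × List (String × Int))) (out : List (String × Int)) : Prop := out = count_pairs_from_multiple_words_alt words_with_count
instance (words_with_count : List (String × List (String × Int))) (out : List (String × Int)) : Decidable (Spec_count_pairs_from_multiple_words words_with_count out) := by unfold Spec_count_pairs_from_multiple_words; infer_instance

-- ===== CLAIM (what is proved, stated in full; the proofs are below) =====
def Claim_equal_count_pairs_from_multiple_words : Prop := ∀ (words_with_count : List (String × List (String × Int))), Dom_count_pairs_from_multiple_words words_with_count → Pre_count_pairs_from_multiple_words words_with_count → Spec_count_pairs_from_multiple_words words_with_count (count_pairs_from_multiple_words words_with_count)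

-- ===== LEMMAS AND PROOFS =====

-- the sorted two-letter key both programs compute, and the per-word key sequence
def keyOf (a b : Char) : String := if a ≤ b then String.ofList [a, b] else String.ofList [b, a]

def keyList : List Char → List String
  | a :: b :: t => keyOf a b :: keyList (b :: t)
  | _ => []

-- 'd[k] = d.get(k, 0) + v' / 'd[k] += v or d[k] = v', as one dict operation
def bump (d : PySem.Dict String Int) (k : String) (v : Int) : PySem.Dict String Int :=
  d.insert k (d.getD k 0 + v)

-- the word's weight counts['kokku'] and the flat weighted-occurrence list of B's first phase
def weight (wc : String × List (String × Int)) : Int := PySem.Dict.getD ⟨wc.2⟩ "kokku" 0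

def occOf (wc : String × List (String × Int)) : List (String × Int) :=
  (keyList wc.1.toList).map (fun k => (k, weight wc))

theorem branch_eq_bump (d : PySem.Dict String Int) (k : String) (v : Int) :
    (if d.contains k then d.modify k 0 (· + v) else d.insert k v) = bump d k v := by
  by_cases h : d.contains k
  · simp [h, PySem.Dict.modify, bump]
  · simp only [Bool.not_eq_true] at h
    simp [h, bump, PySem.Dict.getD_of_not_contains d 0 h]

theorem mapA (cs : List Char) :
    (List.range (cs.length - 1)).map
      (fun k => String.ofList (PySem.List.sorted ((cs.drop k).take 2) (fun c => c) false))
      = keyList cs := by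
  induction cs with
  | nil => rfl
  | cons a t ih =>
    cases t with
    | nil => rfl
    | cons b t' =>
      have hl : (a :: b :: t').length - 1 = ((b :: t').length - 1) + 1 := by simp
      rw [hl, List.range_succ_eq_map, List.map_cons, List.map_map]
      refine congrArg₂ (· :: ·) ?_ ?_
      · simpa using (by
          by_cases h : a ≤ b
          · rw [PySem.List.sorted_eq_self_of_pairwise _ _ (by simp [h])]; simp [keyOf, h]
          · rw [PySem.List.sorted_eq_of_perm_of_pairwise_lt _ [b, a] _ (List.Perm.swap a b [])
              (by simp [lt_of_not_ge h])]
            simp [keyOf, h] :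
          String.ofList (PySem.List.sorted [a, b] (fun c => c) false) = keyOf a b)
      · rw [← ih]
        exact List.map_congr_left (fun k _ => by simp [List.drop_succ_cons])

-- the pyRange/slice form of the key sequence, shared by both ports
theorem sliceKeys (s : String) :
    (PySem.List.pyRange 0 (PySem.Str.len s - 1) 1).map
      (fun i => String.ofList (PySem.List.sorted (PySem.List.slice s.toList (some i) (some (i + 2))) (fun c => c) false))
      = keyList s.toList := by
  rw [PySem.Str.len_eq, PySem.List.pyRange_one]
  have hN : ((s.toList.length : Int) - 1 - 0).toNat = s.toList.length - 1 := by omega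
  rw [hN, List.map_map, ← mapA s.toList]
  apply List.map_congr_left
  intro k _
  simp only [Function.comp, zero_add]
  have h2 : ((k : Nat) : Int) + 2 = ((k : Nat) : Int) + ((2 : Nat) : Int) := by norm_num
  rw [h2, PySem.List.slice_natCast_add]

theorem L1 (ks : List String) (c : Int) (v : String) :
    ∀ d : PySem.Dict String Int,
      (ks.foldl (fun d k => bump d k c) d).getD v 0 = d.getD v 0 + ks.count v * c := by
  induction ks with
  | nil => simp
  | cons k t ih =>
    intro d
    rw [List.foldl_cons, ih]
    by_cases hv : v = k
    · subst hv
      rw [show bump d v c = d.insert v (d.getD v 0 + c) from rfl,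
        PySem.Dict.getD_insert_self, List.count_cons_self]
      push_cast; ring
    · rw [show bump d k c = d.insert k (d.getD k 0 + c) from rfl,
        PySem.Dict.getD_insert_of_ne _ _ _ hv, List.count_cons_of_ne (fun h => hv h.symm)]

theorem L2 (a : String → Int) (v : String) : ∀ (l : List String), l.Nodup →
    ∀ d : PySem.Dict String Int,
      (l.foldl (fun d k => bump d k (a k)) d).getD v 0
        = d.getD v 0 + (if v ∈ l then a v else 0) := by
  intro l
  induction l with
  | nil => simp
  | cons k t ih =>
    intro hnd d
    obtain ⟨hk, hnd'⟩ := List.nodup_cons.mp hnd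
    rw [List.foldl_cons, ih hnd' _]
    by_cases hv : v = k
    · subst hv
      rw [show bump d v (a v) = d.insert v (d.getD v 0 + a v) from rfl,
        PySem.Dict.getD_insert_self]
      simp [hk]
    · rw [show bump d k (a k) = d.insert k (d.getD k 0 + a k) from rfl,
        PySem.Dict.getD_insert_of_ne _ _ _ hv]
      simp [hv]

theorem update_add (s u : PySem.Set String) (x : String) :
    PySem.Set.update s (PySem.Set.add u x) = PySem.Set.add (PySem.Set.update s u) x := by
  by_cases h : x ∈ u
  · have hx : x ∈ PySem.Set.update s u := (PySem.Set.mem_update s u x).mpr (Or.inr h)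
    simp [PySem.Set.add, h, hx]
  · have hx : PySem.Set.update s (u ++ [x]) = PySem.Set.add (PySem.Set.update s u) x := by
      simp [PySem.Set.update, List.foldl_append]
    simpa [PySem.Set.add, h] using hx

theorem update_update (l : List String) : ∀ (u s : PySem.Set String),
    PySem.Set.update s (PySem.Set.update u l) = PySem.Set.update (PySem.Set.update s u) l := by
  induction l with
  | nil => intro u s; rfl
  | cons x l' ih =>
    intro u s
    show PySem.Set.update s (PySem.Set.update (PySem.Set.add u x) l')
        = PySem.Set.update (PySem.Set.add (PySem.Set.update s u) x) l'
    rw [ih (PySem.Set.add u x) s, update_add]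

theorem update_ofList (s : PySem.Set String) (ks : List String) :
    PySem.Set.update s (PySem.Set.ofList ks) = PySem.Set.update s ks := by
  rw [PySem.Set.ofList_eq_foldl]
  simpa [PySem.Set.update] using update_update ks [] s

theorem core (ks : List String) (c : Int) (d : PySem.Dict String Int) (hnd : d.keys.Nodup) :
    ks.foldl (fun d k => bump d k c) d
      = (PySem.Set.ofList ks).foldl (fun d k => bump d k ((ks.count k : Int) * c)) d := by
  apply PySem.Dict.ext
  have h1 : (ks.foldl (fun d k => bump d k c) d).keys.Nodup := by
    simp only [bump]; exact PySem.Dict.nodup_keys_foldl_insert ks _ d hnd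
  have h2 : ((PySem.Set.ofList ks).foldl (fun d k => bump d k ((ks.count k : Int) * c)) d).keys.Nodup := by
    simp only [bump]; exact PySem.Dict.nodup_keys_foldl_insert _ _ d hnd
  rw [PySem.Dict.items_eq_map_keys _ h1 0, PySem.Dict.items_eq_map_keys _ h2 0]
  have hkeys : (ks.foldl (fun d k => bump d k c) d).keys
      = ((PySem.Set.ofList ks).foldl (fun d k => bump d k ((ks.count k : Int) * c)) d).keys := by
    simp only [bump]
    rw [PySem.Dict.keys_foldl_insert, PySem.Dict.keys_foldl_insert, update_ofList]
  rw [hkeys]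
  apply List.map_congr_left; intro k _
  rw [L1 ks c k d, L2 (fun k => (ks.count k : Int) * c) k (PySem.Set.ofList ks) (PySem.Set.nodup_ofList ks) d]
  by_cases hm : k ∈ ks
  · simp [PySem.Set.mem_ofList, hm]
  · simp [PySem.Set.mem_ofList, hm, List.count_eq_zero_of_not_mem hm]

theorem sep_eq_counter (word : String) :
    separate_into_pairs word = PySem.Dict.counter (keyList word.toList) := by
  unfold separate_into_pairs
  rw [← PySem.Dict.foldl_insert_getD_add_one_eq_counter, ← mapA word.toList, List.foldl_map,
    PySem.Str.len_eq, PySem.List.pyRange_one]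
  have hN : ((word.toList.length : Int) - 1 - 0).toNat = word.toList.length - 1 := by omega
  rw [hN, List.foldl_map]
  apply PySem.List.foldl_congr_mem
  intro acc k hk
  simp only [zero_add]
  have h2 : ((k : Nat) : Int) + 2 = ((k : Nat) : Int) + ((2 : Nat) : Int) := by norm_num
  rw [h2, PySem.List.slice_natCast_add]
  rw [branch_eq_bump]
  simp [bump]

-- A's per-word inner loop is exactly the per-occurrence bump fold over that word's keys
theorem stepA_eq (wc : String × List (String × Int)) (d : PySem.Dict String Int)
    (hnd : d.keys.Nodup) :
    (separate_into_pairs wc.1).items.foldl (fun ap pc =>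
      if ap.contains pc.1 then
        ap.modify pc.1 0 (· + pc.2 * PySem.Dict.getD ⟨wc.2⟩ "kokku" 0)
      else
        ap.insert pc.1 (pc.2 * PySem.Dict.getD ⟨wc.2⟩ "kokku" 0)) d
      = (occOf wc).foldl (fun d p => bump d p.1 p.2) d := by
  have h1 : (occOf wc).foldl (fun d p => bump d p.1 p.2) d
      = (keyList wc.1.toList).foldl (fun d k => bump d k (PySem.Dict.getD ⟨wc.2⟩ "kokku" 0)) d := by
    simp [occOf, weight, List.foldl_map]
  rw [h1, sep_eq_counter, PySem.Dict.items_counter, List.foldl_map,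
    core (keyList wc.1.toList) (PySem.Dict.getD ⟨wc.2⟩ "kokku" 0) d hnd]
  apply PySem.List.foldl_congr_mem
  intro acc k hk
  exact branch_eq_bump acc k _

-- A's whole accumulation is the bump fold over the flattened occurrence list
theorem A_eq_occ (wwc : List (String × List (String × Int))) :
    ∀ d : PySem.Dict String Int, d.keys.Nodup →
    wwc.foldl (fun all_pairs wc =>
      (separate_into_pairs wc.1).items.foldl (fun ap pc =>
        if ap.contains pc.1 then
          ap.modify pc.1 0 (· + pc.2 * PySem.Dict.getD ⟨wc.2⟩ "kokku" 0)
        else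
          ap.insert pc.1 (pc.2 * PySem.Dict.getD ⟨wc.2⟩ "kokku" 0)) all_pairs) d
    = (wwc.flatMap occOf).foldl (fun d p => bump d p.1 p.2) d := by
  induction wwc with
  | nil => intro d _; rfl
  | cons wc t ih =>
    intro d hnd
    rw [List.foldl_cons, List.flatMap_cons, List.foldl_append, stepA_eq wc d hnd]
    apply ih
    have : ((occOf wc).foldl (fun d p => bump d p.1 p.2) d).keys.Nodup := by
      simp only [bump]
      exact PySem.Dict.nodup_keys_foldl_insert_key (occOf wc) (fun p => p.1) _ d hnd
    exact this

-- value of the bump fold: sum of the matching occurrence weights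
theorem getD_fold (occ : List (String × Int)) (v : String) :
    ∀ d : PySem.Dict String Int,
      (occ.foldl (fun d p => bump d p.1 p.2) d).getD v 0
        = d.getD v 0 + ((occ.filter (fun p => p.1 == v)).map (fun p => p.2)).sum := by
  induction occ with
  | nil => simp
  | cons p t ih =>
    intro d
    rw [List.foldl_cons, ih]
    by_cases hv : v = p.1
    · subst hv
      rw [show bump d p.1 p.2 = d.insert p.1 (d.getD p.1 0 + p.2) from rfl,
        PySem.Dict.getD_insert_self]
      simp only [List.filter_cons, beq_self_eq_true, if_true, List.map_cons, List.sum_cons]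
      ring
    · rw [show bump d p.1 p.2 = d.insert p.1 (d.getD p.1 0 + p.2) from rfl,
        PySem.Dict.getD_insert_of_ne _ _ _ hv]
      have hne : (p.1 == v) = false := beq_eq_false_iff_ne.mpr (Ne.symm hv)
      simp [hne]

-- the bump fold's result, grouped: dedup'd keys mapped to their weight sums
theorem fold_items (occ : List (String × Int)) :
    (occ.foldl (fun d p => bump d p.1 p.2) PySem.Dict.empty).items
      = ((PySem.List.dedup (occ.map (fun p => p.1))).foldl
          (fun d key => d.insert key (((occ.filter (fun p => p.1 == key)).map (fun p => p.2)).sum))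
          PySem.Dict.empty).items := by
  have hnd : (occ.foldl (fun d p => bump d p.1 p.2) PySem.Dict.empty).keys.Nodup := by
    simp only [bump]
    exact PySem.Dict.nodup_keys_foldl_insert_key occ (fun p => p.1) _ PySem.Dict.empty
      (by simp [PySem.Dict.empty, PySem.Dict.keys])
  have hkeys : (occ.foldl (fun d p => bump d p.1 p.2) PySem.Dict.empty).keys
      = PySem.List.dedup (occ.map (fun p => p.1)) := by
    simp only [bump]
    rw [PySem.Dict.keys_foldl_insert_key]
    rw [PySem.List.dedup_eq_ofList, PySem.Set.ofList_eq_foldl]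
    simp [PySem.Set.update, PySem.Dict.empty, PySem.Dict.keys]
  rw [PySem.Dict.items_eq_map_keys _ hnd 0, hkeys]
  rw [PySem.Dict.items_foldl_insert_fresh _ _ _ _ (by intro a _; simp [PySem.Dict.contains_empty])
    (by simpa using PySem.List.nodup_dedup (occ.map (fun p => p.1)))]
  rw [show (PySem.Dict.empty : PySem.Dict String Int).items = [] from rfl, List.nil_append]
  apply List.map_congr_left
  intro k _
  rw [getD_fold occ k PySem.Dict.empty]
  simp [PySem.Dict.getD_empty]

-- ===== VERDICT (by name: the statement is the Claim_ definition above) =====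
theorem count_pairs_from_multiple_words_spec : Claim_equal_count_pairs_from_multiple_words := by
  intro wwc _ _
  unfold Spec_count_pairs_from_multiple_words count_pairs_from_multiple_words count_pairs_from_multiple_words_alt
  have hflat : wwc.flatMap (fun wc =>
      (PySem.List.pyRange 0 (PySem.Str.len wc.1 - 1) 1).map (fun i =>
        (String.ofList (PySem.List.sorted (PySem.List.slice wc.1.toList (some i) (some (i + 2))) (fun c => c) false),
         PySem.Dict.getD ⟨wc.2⟩ "kokku" 0)))
      = wwc.flatMap occOf := by
    apply List.flatMap_congr
    intro wc _
    rw [occOf, ← sliceKeys wc.1, List.map_map]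
    rfl
  simp only [hflat]
  rw [A_eq_occ wwc PySem.Dict.empty (by simp [PySem.Dict.empty, PySem.Dict.keys])]
  exact fold_items (wwc.flatMap occOf)
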